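-- pv_equiv track=rewrite | github.com/gamamoe/ace-the-coding-interviews | Minji/84_귤고르기.py | solution
-- ===== SOURCE A (Python) =====
-- from collections import Counter
--
-- def solution(k, tangerine):
-- 	cnt = Counter(tangerine)
-- 	res, tot = 0, 0
--
-- 	lists = sorted(cnt.values(), reverse=True)
--
-- 	for count in lists:
-- 			tot += count
-- 			res += 1
--
-- 			if tot >= k:
-- 				break
--
-- 	return res
-- ===== SOURCE B (Python) =====
-- def solution(k, tangerine):
--     # Counting-sort approach: bucket the frequencies (each is between 1 and n)
--     # and walk buckets from the largest frequency down; no comparison sort.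
--     freq = {}
--     for t in tangerine:
--         freq[t] = freq.get(t, 0) + 1
--     n = len(tangerine)
--     buckets = {}
--     for c in freq.values():
--         buckets[c] = buckets.get(c, 0) + 1
--     res = tot = 0
--     for c in range(n, 0, -1):
--         for _ in range(buckets.get(c, 0)):
--             tot += c
--             res += 1
--             if tot >= k:
--                 return res
--     return res
-- ===== Notes on version B (the rewrite author's own statement) =====
-- stated objective: alternative
-- what changed: Replaces the comparison sort of the frequency list with a counting-sort style bucket pass: frequencies (all in 1..n) are bucketed and walked from n down to 1, with the greedy accumulation inlined.
import Mathlib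
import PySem

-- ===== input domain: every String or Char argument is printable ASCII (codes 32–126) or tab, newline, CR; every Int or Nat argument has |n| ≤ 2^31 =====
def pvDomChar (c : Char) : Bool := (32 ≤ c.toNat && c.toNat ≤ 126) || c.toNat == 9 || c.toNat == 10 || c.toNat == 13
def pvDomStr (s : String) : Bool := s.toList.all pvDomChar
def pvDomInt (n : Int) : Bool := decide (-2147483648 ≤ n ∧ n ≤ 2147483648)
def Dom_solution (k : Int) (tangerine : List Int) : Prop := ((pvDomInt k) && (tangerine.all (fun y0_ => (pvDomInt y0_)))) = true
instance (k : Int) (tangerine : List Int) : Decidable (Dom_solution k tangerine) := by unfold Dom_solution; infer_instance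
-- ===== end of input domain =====

-- B replaces A's comparison sort of the frequency list by a counting-sort style bucket pass over frequencies 1..n (objective: alternative algorithm).

-- ===== PORT A =====
-- A's for-loop with its break: recursion over the sorted frequency list.
def solutionLoop (k : Int) : List Int → Int → Int → Int
  | [], res, _ => res
  | c :: rest, res, tot =>
      let tot' := tot + c
      let res' := res + 1
      if tot' ≥ k then res' else solutionLoop k rest res' tot'

def solution (k : Int) (tangerine : List Int) : Int :=
  let cnt := PySem.Dict.counter tangerine
  let lists := PySem.List.sorted cnt.values (fun x => x) true
  solutionLoop k lists 0 0

-- ===== PORT B =====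
-- inner 'for _ in range(b)' with early return: inl = fell through with (res, tot), inr = returned res
def bInner (k c : Int) : Nat → Int → Int → (Int × Int) ⊕ Int
  | 0, res, tot => Sum.inl (res, tot)
  | b + 1, res, tot =>
      let tot' := tot + c
      let res' := res + 1
      if tot' ≥ k then Sum.inr res' else bInner k c b res' tot'

-- outer 'for c in range(n, 0, -1)' with the early return propagated
def bOuter (k : Int) (buckets : PySem.Dict Int Int) : List Int → Int → Int → Int
  | [], res, _ => res
  | c :: cs, res, tot =>
      match bInner k c (buckets.getD c 0).toNat res tot with
      | Sum.inr r => r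
      | Sum.inl (res', tot') => bOuter k buckets cs res' tot'

def solution_alt (k : Int) (tangerine : List Int) : Int :=
  let freq := tangerine.foldl (fun d t => d.insert t (d.getD t 0 + 1)) PySem.Dict.empty
  let n : Int := tangerine.length
  let buckets := freq.values.foldl (fun d c => d.insert c (d.getD c 0 + 1)) PySem.Dict.empty
  bOuter k buckets (PySem.List.pyRange n 0 (-1)) 0 0

-- ===== PRECONDITION & SPEC =====
def Spec_solution (k : Int) (tangerine : List Int) (out : Int) : Prop := out = solution_alt k tangerine
instance (k : Int) (tangerine : List Int) (out : Int) : Decidable (Spec_solution k tangerine out) := by unfold Spec_solution; infer_instance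

-- ===== CLAIM (what is proved, stated in full; the proofs are below) =====
def Claim_equal_solution : Prop := ∀ (k : Int) (tangerine : List Int), Dom_solution k tangerine → Spec_solution k tangerine (solution k tangerine)

-- ===== LEMMAS AND PROOFS =====

-- the inner bounded loop is A's loop run on 'replicate b c' prepended
theorem bInner_spec (k c : Int) (b : Nat) (rest : List Int) (res tot : Int) :
    solutionLoop k (List.replicate b c ++ rest) res tot =
      (match bInner k c b res tot with
       | Sum.inr r => r
       | Sum.inl (res', tot') => solutionLoop k rest res' tot') := by
  induction b generalizing res tot with
  | zero => simp [bInner]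
  | succ b ih =>
      simp only [List.replicate_succ, List.cons_append, solutionLoop, bInner]
      split_ifs with h
      · rfl
      · exact ih _ _

-- B's double loop is A's loop on the flattened bucket expansion
theorem bOuter_spec (k : Int) (buckets : PySem.Dict Int Int) (cs : List Int) (res tot : Int) :
    bOuter k buckets cs res tot =
      solutionLoop k (cs.flatMap (fun c => List.replicate (buckets.getD c 0).toNat c)) res tot := by
  induction cs generalizing res tot with
  | nil => simp [bOuter, List.flatMap, solutionLoop]
  | cons c cs ih =>
      simp only [List.flatMap_cons, bOuter]
      rw [bInner_spec]
      cases h : bInner k c (buckets.getD c 0).toNat res tot with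
      | inl p => simp [ih]
      | inr r => simp

theorem mem_flatMap_replicate {cs : List Int} {m : Int → Nat} {x : Int}
    (hx : x ∈ cs.flatMap (fun c => List.replicate (m c) c)) : x ∈ cs := by
  rcases List.mem_flatMap.mp hx with ⟨c, hc, hx⟩
  rcases List.eq_of_mem_replicate hx
  exact hc

-- strictly decreasing bucket order yields a (· ≥ ·)-sorted expansion
theorem pairwise_flatMap_replicate (cs : List Int) (m : Int → Nat)
    (h : cs.Pairwise (· > ·)) :
    (cs.flatMap (fun c => List.replicate (m c) c)).Pairwise (· ≥ ·) := by
  induction cs with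
  | nil => simp
  | cons c cs ih =>
      rcases List.pairwise_cons.mp h with ⟨hc, hcs⟩
      simp only [List.flatMap_cons]
      refine List.pairwise_append.mpr ⟨?_, ih hcs, ?_⟩
      · exact List.pairwise_replicate.mpr (Or.inr le_rfl)
      · intro a ha b hb
        rcases List.eq_of_mem_replicate ha
        exact le_of_lt (hc _ (mem_flatMap_replicate hb))

theorem count_flatMap_replicate (cs : List Int) (m : Int → Nat) (x : Int)
    (hnd : cs.Nodup) :
    (cs.flatMap (fun c => List.replicate (m c) c)).count x =
      if x ∈ cs then m x else 0 := by
  induction cs with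
  | nil => simp
  | cons c cs ih =>
      rcases List.nodup_cons.mp hnd with ⟨hc, hnd'⟩
      simp only [List.flatMap_cons, List.count_append, ih hnd', List.count_replicate,
        List.mem_cons]
      by_cases hxc : x = c
      · subst hxc
        simp [hc]
      · simp [hxc, Ne.symm hxc]

-- every value of Counter(xs) is a count of a member: between 1 and len(xs)
theorem values_counter_bounds (xs : List Int) (v : Int)
    (hv : v ∈ (PySem.Dict.counter xs).values) : 1 ≤ v ∧ v ≤ (xs.length : Int) := by
  have hvals : (PySem.Dict.counter xs).values
      = ((PySem.Set.ofList xs).map (fun k => ((xs.count k : Int)))) := by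
    show ((PySem.Dict.counter xs).items.map (·.2))
        = ((PySem.Set.ofList xs).map (fun k => ((xs.count k : Int))))
    rw [PySem.Dict.items_counter]
    simp
  rw [hvals] at hv
  rcases List.mem_map.mp hv with ⟨a, ha, rfl⟩
  have ha' : a ∈ xs := (PySem.Set.mem_ofList _ _).mp ha
  constructor
  · exact_mod_cast List.count_pos_iff.mpr ha'
  · exact_mod_cast List.count_le_length

-- the bucket expansion is a permutation of the value list
theorem perm_flatMap_replicate (xs : List Int) :
    ((PySem.List.pyRange (xs.length : Int) 0 (-1)).flatMap
        (fun c => List.replicate ((PySem.Dict.counter xs).values.count c) c)).Perm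
      (PySem.Dict.counter xs).values := by
  apply List.perm_iff_count.mpr
  intro x
  rw [count_flatMap_replicate]
  · split_ifs with hx
    · rfl
    · symm
      rw [List.count_eq_zero]
      intro hmem
      apply hx
      rcases values_counter_bounds xs x hmem with ⟨h1, h2⟩
      rw [PySem.List.mem_pyRange_neg_one]
      omega
  · rw [PySem.List.pyRange_neg_one_eq_reverse]
    exact List.nodup_reverse.mpr (PySem.List.nodup_pyRange_one _ _)

theorem pairwise_gt_pyRange_neg_one (a b : Int) :
    (PySem.List.pyRange a b (-1)).Pairwise (· > ·) := by
  rw [PySem.List.pyRange_neg_one_eq_reverse, List.pairwise_reverse]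
  simpa using PySem.List.pairwise_lt_pyRange_one (b + 1) (a + 1)

-- the bucket expansion IS sorted(values, reverse=True)
theorem flatMap_eq_sorted (xs : List Int) :
    PySem.List.sorted (PySem.Dict.counter xs).values (fun x => x) true =
      (PySem.List.pyRange (xs.length : Int) 0 (-1)).flatMap
        (fun c => List.replicate ((PySem.Dict.counter xs).values.count c) c) := by
  refine List.Perm.eq_of_pairwise' (r := fun (a b : Int) => b ≤ a) ?_ ?_ ?_
  · exact PySem.List.sorted_pairwise_rev _ _
  · exact pairwise_flatMap_replicate _ _ (pairwise_gt_pyRange_neg_one _ _)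
  · exact (PySem.List.sorted_perm _ _ _).trans (perm_flatMap_replicate xs).symm

-- ===== VERDICT (by name: the statement is the Claim_ definition above) =====
theorem solution_spec : Claim_equal_solution := by
  intro k tangerine _
  show solution k tangerine = solution_alt k tangerine
  unfold solution solution_alt
  simp only [PySem.Dict.foldl_insert_getD_add_one_eq_counter]
  rw [bOuter_spec, flatMap_eq_sorted]
  congr 1
  apply List.flatMap_congr  -- align the two bucket-count expressions
  intro c _
  rw [PySem.Dict.getD_counter]
  simp
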